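-- pv_equiv track=rewrite | github.com/darrwalk/coinbase-data-fetcher | scripts/update_coins.py | get_category_for_coin
-- ===== SOURCE A (Python) =====
-- def get_category_for_coin(coin_id: str) -> str:
--     """Determine category for a coin."""
--     categories = {
--         "Major cryptocurrencies": ["bitcoin", "ethereum"],
--         "Stablecoins": ["usdc", "usdt", "dai", "tusd", "pax", "busd"],
--         "Layer 1 & Layer 2": [
--             "solana", "ada", "avalanche", "polkadot", "near",
--             "internet-computer", "cosmos", "aptos", "arbitrum", "optimism",
--             "sui", "algorand", "eos", "tezos", "hedera", "vechain"
--         ],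
--         "DeFi tokens": [
--             "uniswap", "aave", "curve", "maker", "compound",
--             "synthetix", "lido", "sushiswap", "yearn-finance",
--             "balancer", "perpetual-protocol", "loopring", "1inch"
--         ],
--         "Gaming & Metaverse": [
--             "sandbox", "decentraland", "axie-infinity", "immutablex",
--             "ethereum-name-service", "blur", "apecoin"
--         ],
--         "Infrastructure & Web3": [
--             "chainlink", "filecoin", "the-graph", "ankr", "skale", "mask-network"
--         ],
--         "Meme coins": ["dogecoin", "shiba-inu", "dogwifhat", "pepe", "floki"],
--         "Privacy & Payments": ["zcash", "stellar", "xrp"],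
--         "Bitcoin forks & Classic": ["bitcoin-cash", "litecoin", "ethereum-classic"],
--         "Utility tokens": ["basic-attention-token", "chiliz"],
--         "Enterprise & Other": ["vechain", "hedera", "quant", "eos", "xrp"]
--     }
--
--     for category, coins in categories.items():
--         if coin_id in coins:
--             return category
--
--     return "Other"
-- ===== SOURCE B (Python) =====
-- # Flat hand-written coin -> category table (one entry per coin; the duplicated
-- # coins xrp/vechain/hedera/eos are listed under their first-listed category),
-- # so the function is a single dict lookup with a default.
-- _COIN_TO_CATEGORY = {
--     "bitcoin": "Major cryptocurrencies",
--     "ethereum": "Major cryptocurrencies",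
--     "usdc": "Stablecoins",
--     "usdt": "Stablecoins",
--     "dai": "Stablecoins",
--     "tusd": "Stablecoins",
--     "pax": "Stablecoins",
--     "busd": "Stablecoins",
--     "solana": "Layer 1 & Layer 2",
--     "ada": "Layer 1 & Layer 2",
--     "avalanche": "Layer 1 & Layer 2",
--     "polkadot": "Layer 1 & Layer 2",
--     "near": "Layer 1 & Layer 2",
--     "internet-computer": "Layer 1 & Layer 2",
--     "cosmos": "Layer 1 & Layer 2",
--     "aptos": "Layer 1 & Layer 2",
--     "arbitrum": "Layer 1 & Layer 2",
--     "optimism": "Layer 1 & Layer 2",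
--     "sui": "Layer 1 & Layer 2",
--     "algorand": "Layer 1 & Layer 2",
--     "eos": "Layer 1 & Layer 2",
--     "tezos": "Layer 1 & Layer 2",
--     "hedera": "Layer 1 & Layer 2",
--     "vechain": "Layer 1 & Layer 2",
--     "uniswap": "DeFi tokens",
--     "aave": "DeFi tokens",
--     "curve": "DeFi tokens",
--     "maker": "DeFi tokens",
--     "compound": "DeFi tokens",
--     "synthetix": "DeFi tokens",
--     "lido": "DeFi tokens",
--     "sushiswap": "DeFi tokens",
--     "yearn-finance": "DeFi tokens",
--     "balancer": "DeFi tokens",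
--     "perpetual-protocol": "DeFi tokens",
--     "loopring": "DeFi tokens",
--     "1inch": "DeFi tokens",
--     "sandbox": "Gaming & Metaverse",
--     "decentraland": "Gaming & Metaverse",
--     "axie-infinity": "Gaming & Metaverse",
--     "immutablex": "Gaming & Metaverse",
--     "ethereum-name-service": "Gaming & Metaverse",
--     "blur": "Gaming & Metaverse",
--     "apecoin": "Gaming & Metaverse",
--     "chainlink": "Infrastructure & Web3",
--     "filecoin": "Infrastructure & Web3",
--     "the-graph": "Infrastructure & Web3",
--     "ankr": "Infrastructure & Web3",
--     "skale": "Infrastructure & Web3",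
--     "mask-network": "Infrastructure & Web3",
--     "dogecoin": "Meme coins",
--     "shiba-inu": "Meme coins",
--     "dogwifhat": "Meme coins",
--     "pepe": "Meme coins",
--     "floki": "Meme coins",
--     "zcash": "Privacy & Payments",
--     "stellar": "Privacy & Payments",
--     "xrp": "Privacy & Payments",
--     "bitcoin-cash": "Bitcoin forks & Classic",
--     "litecoin": "Bitcoin forks & Classic",
--     "ethereum-classic": "Bitcoin forks & Classic",
--     "basic-attention-token": "Utility tokens",
--     "chiliz": "Utility tokens",
--     "quant": "Enterprise & Other",
-- }
--
--
-- def get_category_for_coin(coin_id: str) -> str: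
--     """Determine category for a coin."""
--     return _COIN_TO_CATEGORY.get(coin_id, "Other")
-- ===== Notes on version B (the rewrite author's own statement) =====
-- stated objective: idiomatic
-- what changed: Replaces the per-call scan over a dict of category->coin-list with a single flat hand-written coin->category dict (duplicated coins listed once, under their first-listed category), so the function body is one dict lookup with a default.
import Mathlib
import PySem

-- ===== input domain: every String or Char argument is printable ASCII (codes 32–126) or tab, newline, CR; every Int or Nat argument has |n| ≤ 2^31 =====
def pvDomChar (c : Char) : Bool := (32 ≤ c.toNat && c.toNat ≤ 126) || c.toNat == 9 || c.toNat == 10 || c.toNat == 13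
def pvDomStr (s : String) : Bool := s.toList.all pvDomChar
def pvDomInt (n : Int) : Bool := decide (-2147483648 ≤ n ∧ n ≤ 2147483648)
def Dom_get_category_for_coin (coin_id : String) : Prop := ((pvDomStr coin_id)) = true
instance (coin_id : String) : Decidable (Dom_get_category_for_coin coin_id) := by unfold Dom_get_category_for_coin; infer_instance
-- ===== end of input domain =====

-- B replaces A's per-call scan of a category→coin-list dict by one lookup in a flat
-- hand-written coin→category dict (each duplicated coin listed once, under its
-- first-listed category), the idiomatic shape for this task.

-- ===== PORT A =====
-- the categories dict literal of A, in insertion order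
def pvCategoriesA : List (String × List String) :=
  [ ("Major cryptocurrencies", ["bitcoin", "ethereum"]),
    ("Stablecoins", ["usdc", "usdt", "dai", "tusd", "pax", "busd"]),
    ("Layer 1 & Layer 2",
      ["solana", "ada", "avalanche", "polkadot", "near",
       "internet-computer", "cosmos", "aptos", "arbitrum", "optimism",
       "sui", "algorand", "eos", "tezos", "hedera", "vechain"]),
    ("DeFi tokens",
      ["uniswap", "aave", "curve", "maker", "compound",
       "synthetix", "lido", "sushiswap", "yearn-finance",
       "balancer", "perpetual-protocol", "loopring", "1inch"]),
    ("Gaming & Metaverse",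
      ["sandbox", "decentraland", "axie-infinity", "immutablex",
       "ethereum-name-service", "blur", "apecoin"]),
    ("Infrastructure & Web3",
      ["chainlink", "filecoin", "the-graph", "ankr", "skale", "mask-network"]),
    ("Meme coins", ["dogecoin", "shiba-inu", "dogwifhat", "pepe", "floki"]),
    ("Privacy & Payments", ["zcash", "stellar", "xrp"]),
    ("Bitcoin forks & Classic", ["bitcoin-cash", "litecoin", "ethereum-classic"]),
    ("Utility tokens", ["basic-attention-token", "chiliz"]),
    ("Enterprise & Other", ["vechain", "hedera", "quant", "eos", "xrp"]) ]

-- 'for category, coins in categories.items(): if coin_id in coins: return category' / 'return "Other"'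
def pvScanA (coin_id : String) : List (String × List String) → String
  | [] => "Other"
  | (category, coins) :: rest =>
      if coins.contains coin_id then category else pvScanA coin_id rest

def get_category_for_coin (coin_id : String) : String :=
  pvScanA coin_id pvCategoriesA

-- ===== PORT B =====
-- the flat _COIN_TO_CATEGORY dict literal of B (unique keys, insertion order)
def pvCoinToCategory : PySem.Dict String String := PySem.Dict.mk
  [ ("bitcoin", "Major cryptocurrencies"),
    ("ethereum", "Major cryptocurrencies"),
    ("usdc", "Stablecoins"),
    ("usdt", "Stablecoins"),
    ("dai", "Stablecoins"),
    ("tusd", "Stablecoins"),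
    ("pax", "Stablecoins"),
    ("busd", "Stablecoins"),
    ("solana", "Layer 1 & Layer 2"),
    ("ada", "Layer 1 & Layer 2"),
    ("avalanche", "Layer 1 & Layer 2"),
    ("polkadot", "Layer 1 & Layer 2"),
    ("near", "Layer 1 & Layer 2"),
    ("internet-computer", "Layer 1 & Layer 2"),
    ("cosmos", "Layer 1 & Layer 2"),
    ("aptos", "Layer 1 & Layer 2"),
    ("arbitrum", "Layer 1 & Layer 2"),
    ("optimism", "Layer 1 & Layer 2"),
    ("sui", "Layer 1 & Layer 2"),
    ("algorand", "Layer 1 & Layer 2"),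
    ("eos", "Layer 1 & Layer 2"),
    ("tezos", "Layer 1 & Layer 2"),
    ("hedera", "Layer 1 & Layer 2"),
    ("vechain", "Layer 1 & Layer 2"),
    ("uniswap", "DeFi tokens"),
    ("aave", "DeFi tokens"),
    ("curve", "DeFi tokens"),
    ("maker", "DeFi tokens"),
    ("compound", "DeFi tokens"),
    ("synthetix", "DeFi tokens"),
    ("lido", "DeFi tokens"),
    ("sushiswap", "DeFi tokens"),
    ("yearn-finance", "DeFi tokens"),
    ("balancer", "DeFi tokens"),
    ("perpetual-protocol", "DeFi tokens"),
    ("loopring", "DeFi tokens"),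
    ("1inch", "DeFi tokens"),
    ("sandbox", "Gaming & Metaverse"),
    ("decentraland", "Gaming & Metaverse"),
    ("axie-infinity", "Gaming & Metaverse"),
    ("immutablex", "Gaming & Metaverse"),
    ("ethereum-name-service", "Gaming & Metaverse"),
    ("blur", "Gaming & Metaverse"),
    ("apecoin", "Gaming & Metaverse"),
    ("chainlink", "Infrastructure & Web3"),
    ("filecoin", "Infrastructure & Web3"),
    ("the-graph", "Infrastructure & Web3"),
    ("ankr", "Infrastructure & Web3"),
    ("skale", "Infrastructure & Web3"),
    ("mask-network", "Infrastructure & Web3"),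
    ("dogecoin", "Meme coins"),
    ("shiba-inu", "Meme coins"),
    ("dogwifhat", "Meme coins"),
    ("pepe", "Meme coins"),
    ("floki", "Meme coins"),
    ("zcash", "Privacy & Payments"),
    ("stellar", "Privacy & Payments"),
    ("xrp", "Privacy & Payments"),
    ("bitcoin-cash", "Bitcoin forks & Classic"),
    ("litecoin", "Bitcoin forks & Classic"),
    ("ethereum-classic", "Bitcoin forks & Classic"),
    ("basic-attention-token", "Utility tokens"),
    ("chiliz", "Utility tokens"),
    ("quant", "Enterprise & Other") ]

def get_category_for_coin_alt (coin_id : String) : String :=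
  pvCoinToCategory.getD coin_id "Other"

-- ===== PRECONDITION & SPEC =====
def Spec_get_category_for_coin (coin_id : String) (out : String) : Prop := out = get_category_for_coin_alt coin_id
instance (coin_id : String) (out : String) : Decidable (Spec_get_category_for_coin coin_id out) := by unfold Spec_get_category_for_coin; infer_instance

-- ===== CLAIM (what is proved, stated in full; the proofs are below) =====
def Claim_equal_get_category_for_coin : Prop := ∀ (coin_id : String), Dom_get_category_for_coin coin_id → Spec_get_category_for_coin coin_id (get_category_for_coin coin_id)

-- ===== LEMMAS AND PROOFS =====

-- proof-side: first-match association lookup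
def pvAssoc (s : String) : List (String × String) → Option String
  | [] => none
  | (k, v) :: rest => if k == s then some v else pvAssoc s rest

theorem dict_get?_eq_pvAssoc (s : String) (L : List (String × String)) :
    (PySem.Dict.mk L).get? s = pvAssoc s L := by
  induction L with
  | nil => rfl
  | cons p rest ih =>
      obtain ⟨k, v⟩ := p
      rw [PySem.Dict.get?_mk_cons, pvAssoc]
      split <;> simp_all

theorem pvAssoc_map_append (s cat : String) (coins : List String) (L : List (String × String)) :
    pvAssoc s (coins.map (fun c => (c, cat)) ++ L) =
      if coins.contains s then some cat else pvAssoc s L := by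
  induction coins with
  | nil => simp
  | cons c cs ih =>
      simp only [List.map_cons, List.cons_append, pvAssoc, List.contains_cons, ih]
      by_cases h : c = s
      · subst h; simp
      · have h1 : (c == s) = false := by simp [h]
        have h2 : (s == c) = false := by simp [Ne.symm h]
        simp [h1, h2]

theorem scanA_eq_pvAssoc (s : String) (cats : List (String × List String)) :
    pvScanA s cats =
      (pvAssoc s (cats.flatMap fun p => p.2.map fun c => (c, p.1))).getD "Other" := by
  induction cats with
  | nil => rfl
  | cons p rest ih =>
      obtain ⟨cat, coins⟩ := p
      simp only [pvScanA, List.flatMap_cons, pvAssoc_map_append]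
      split <;> simp [ih]

-- ===== VERDICT (by name: the statement is the Claim_ definition above) =====
theorem get_category_for_coin_spec : Claim_equal_get_category_for_coin := by
  intro s _
  show get_category_for_coin s = get_category_for_coin_alt s
  by_cases hv : s = "vechain"; · subst hv; decide
  by_cases hh : s = "hedera"; · subst hh; decide
  by_cases he : s = "eos"; · subst he; decide
  by_cases hx : s = "xrp"; · subst hx; decide
  unfold get_category_for_coin get_category_for_coin_alt pvCoinToCategory
  rw [PySem.Dict.getD_eq_get?_getD, dict_get?_eq_pvAssoc, scanA_eq_pvAssoc]
  have bv : (("vechain" : String) == s) = false := by simp [Ne.symm hv]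
  have bh : (("hedera" : String) == s) = false := by simp [Ne.symm hh]
  have be : (("eos" : String) == s) = false := by simp [Ne.symm he]
  have bx : (("xrp" : String) == s) = false := by simp [Ne.symm hx]
  simp only [pvCategoriesA, List.flatMap_cons, List.flatMap_nil, List.map_cons, List.map_nil,
    List.cons_append, List.nil_append, List.append_nil, pvAssoc, bv, bh, be, bx,
    Bool.false_eq_true, if_false]
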